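-- pv_equiv track=rewrite | github.com/emanuelgustavo/pythonscripts | Introdução a Ciencia da Computação com Python - PII/w2 - Panda_ime - xadrez.py | acha_posicao_peca
-- ===== SOURCE A (Python) =====
-- def acha_posicao_peca(tab):
--     tabuleiro = tab
--     posicao_peca_linha = 0
--     posicao_peca_coluna = 0
--
--     linhas = len(tabuleiro)
--     colunas = len(tabuleiro[0])
--
--     for i in range(linhas):
--         for j in range(colunas):
--             if tabuleiro[i][j] != ' ':
--                 posicao_peca_coluna = j
--                 posicao_peca_linha = i
--
--     posicao = traduz_posicao(posicao_peca_linha, posicao_peca_coluna)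
--     posicao_linha = posicao[0]
--     posicao_coluna = posicao[1]
--
--     return [posicao_linha, posicao_coluna, posicao_peca_linha, posicao_peca_coluna]
--
-- def traduz_posicao(posicao_peca_linha, posicao_peca_coluna):
--
--     posicao_coluna = {
--         0:2,
--         1:6,
--         2:10,
--         3:14,
--         4:18,
--         5:22,
--         6:26,
--         7:30
--     }
--     posicao_Linha = {
--         0:1,
--         1:3,
--         2:5,
--         3:7,
--         4:9,
--         5:11,
--         6:13,
--         7:15
--     }
--
--     return [posicao_Linha[posicao_peca_linha], posicao_coluna[posicao_peca_coluna]]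
-- ===== SOURCE B (Python) =====
-- def traduz_posicao(posicao_peca_linha, posicao_peca_coluna):
--     # closed-form translation: row k -> 2k+1, column k -> 4k+2
--     return [2 * posicao_peca_linha + 1, 4 * posicao_peca_coluna + 2]
--
-- def acha_posicao_peca(tab):
--     linhas = len(tab)
--     colunas = len(tab[0])
--     li, lj = next(((i, j)
--                    for i in reversed(range(linhas))
--                    for j in reversed(range(colunas))
--                    if tab[i][j] != ' '),
--                   (0, 0))
--     posicao = traduz_posicao(li, lj)
--     return [posicao[0], posicao[1], li, lj]
-- ===== Notes on version B (the rewrite author's own statement) =====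
-- stated objective: simpler
-- what changed: Replaces 'scan every cell forward and keep overwriting the last non-blank position' by a backward generator search that stops at the first non-blank cell (reverse lexicographic first match = forward last match), and replaces the two hard-coded translation dicts by the closed-form formulas 2*i+1 and 4*j+2.
import Mathlib
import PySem

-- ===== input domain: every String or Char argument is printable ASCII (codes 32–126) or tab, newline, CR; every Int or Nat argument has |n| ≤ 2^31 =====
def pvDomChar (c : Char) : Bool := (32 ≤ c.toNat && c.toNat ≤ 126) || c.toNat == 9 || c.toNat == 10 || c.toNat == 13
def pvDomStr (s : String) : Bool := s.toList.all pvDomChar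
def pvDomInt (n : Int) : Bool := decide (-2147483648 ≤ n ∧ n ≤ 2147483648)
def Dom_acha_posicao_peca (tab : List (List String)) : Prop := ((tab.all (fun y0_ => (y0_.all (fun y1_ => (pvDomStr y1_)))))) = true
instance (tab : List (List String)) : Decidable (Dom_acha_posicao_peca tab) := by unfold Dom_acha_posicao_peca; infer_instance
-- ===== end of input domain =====

-- B replaces A's full forward scan (keep overwriting the last non-blank cell) by a backward
-- first-match search and replaces the two translation dicts by closed formulas; objective: simpler.

-- ===== PORT A =====
-- A's helper: two literal translation dicts; a key outside 0..7 is a KeyError in Python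
-- (Dict.get? = none there) — excluded by Pre_; .getD 0 only makes the port total.
def traduz_posicao (posicao_peca_linha posicao_peca_coluna : Int) : List Int :=
  let posicao_coluna : PySem.Dict Int Int :=
    PySem.Dict.ofList [(0, 2), (1, 6), (2, 10), (3, 14), (4, 18), (5, 22), (6, 26), (7, 30)]
  let posicao_Linha : PySem.Dict Int Int :=
    PySem.Dict.ofList [(0, 1), (1, 3), (2, 5), (3, 7), (4, 9), (5, 11), (6, 13), (7, 15)]
  [(posicao_Linha.get? posicao_peca_linha).getD 0,
   (posicao_coluna.get? posicao_peca_coluna).getD 0]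

-- tab[0] and tabuleiro[i][j] are IndexErrors on an empty board / a row shorter than row 0
-- (pyGetD is exact in range; out-of-range inputs are excluded by Pre_).
def acha_posicao_peca (tab : List (List String)) : List Int :=
  let tabuleiro := tab
  let linhas : Int := tabuleiro.length
  let colunas : Int := (PySem.List.pyGetD tabuleiro 0 []).length
  let st : Int × Int :=
    (PySem.List.pyRange 0 linhas 1).foldl (fun s i =>
      (PySem.List.pyRange 0 colunas 1).foldl (fun s j =>
        if PySem.List.pyGetD (PySem.List.pyGetD tabuleiro i []) j "" ≠ " " then (i, j) else s) s)
      (0, 0)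
  let posicao := traduz_posicao st.1 st.2
  [PySem.List.pyGetD posicao 0 0, PySem.List.pyGetD posicao 1 0, st.1, st.2]

-- ===== PORT B =====
def traduz_posicao_alt (posicao_peca_linha posicao_peca_coluna : Int) : List Int :=
  [2 * posicao_peca_linha + 1, 4 * posicao_peca_coluna + 2]

-- Source B's backward generator with default: first non-blank cell of the reversed scan order
-- (next(…, (0,0)) = find?.getD); tab[0] on an empty board raises in Source B — excluded by Pre_.
def acha_posicao_peca_alt (tab : List (List String)) : List Int :=
  let linhas : Nat := tab.length
  let colunas : Nat := (tab.getD 0 []).length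
  let pos : Nat × Nat :=
    (((List.range linhas).reverse.flatMap fun i =>
        (List.range colunas).reverse.map fun j => (i, j)).find? fun q =>
          ((tab.getD q.1 []).getD q.2 "") ≠ " ").getD (0, 0)
  let posicao := traduz_posicao_alt (pos.1 : Int) (pos.2 : Int)
  [posicao[0]!, posicao[1]!, (pos.1 : Int), (pos.2 : Int)]

-- ===== PRECONDITION & SPEC =====
-- Pre_ excludes exactly the inputs on which A raises: an empty board (tab[0] IndexError), a row
-- shorter than row 0 (tab[i][j] IndexError), and boards whose lexicographically last non-blank
-- scanned cell has row > 7 or column > 7 (KeyError in traduz_posicao's dicts); the last clause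
-- says every out-of-range non-blank cell is lexicographically dominated by an in-range one.
def Pre_acha_posicao_peca (tab : List (List String)) : Prop :=
  tab ≠ [] ∧ (∀ row ∈ tab, (tab.getD 0 []).length ≤ row.length) ∧
  ∀ i < tab.length, ∀ j < (tab.getD 0 []).length,
    (tab.getD i []).getD j "" ≠ " " → (7 < i ∨ 7 < j) →
    ∃ i' < tab.length, ∃ j' < (tab.getD 0 []).length,
      (tab.getD i' []).getD j' "" ≠ " " ∧ i' ≤ 7 ∧ j' ≤ 7 ∧
      (i < i' ∨ (i = i' ∧ j < j'))
instance (tab : List (List String)) : Decidable (Pre_acha_posicao_peca tab) := by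
  unfold Pre_acha_posicao_peca
  exact @instDecidableAnd _ _ inferInstance (@instDecidableAnd _ _ inferInstance
    (@Nat.decidableBallLT _ _ (fun _ _ => @Nat.decidableBallLT _ _ (fun _ _ => inferInstance))))

def pvWitness_acha_posicao_peca : List (List String) := [[" ", "x"], [" ", " "]]

def Spec_acha_posicao_peca (tab : List (List String)) (out : List Int) : Prop :=
  out = acha_posicao_peca_alt tab
instance (tab : List (List String)) (out : List Int) : Decidable (Spec_acha_posicao_peca tab out) := by
  unfold Spec_acha_posicao_peca; infer_instance

-- ===== CLAIM (what is proved, stated in full; the proofs are below) =====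
def Claim_equal_acha_posicao_peca : Prop :=
  ∀ (tab : List (List String)), Dom_acha_posicao_peca tab → Pre_acha_posicao_peca tab →
    Spec_acha_posicao_peca tab (acha_posicao_peca tab)

-- ===== LEMMAS AND PROOFS =====

-- a fold that overwrites its state at every match returns the LAST match (first of the reverse)
theorem foldl_overwrite_eq_find?_reverse {α β : Type} (P : α → Prop) [DecidablePred P] (g : α → β)
    (l : List α) (init : β) :
    l.foldl (fun s x => if P x then g x else s) init
      = ((l.reverse.find? (fun x => decide (P x))).map g).getD init := by
  induction l generalizing init with
  | nil => rfl
  | cons x t ih =>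
    simp only [List.foldl_cons, ih, List.reverse_cons, List.find?_append]
    by_cases hx : P x <;>
      cases ht : t.reverse.find? (fun x => decide (P x)) <;> simp [hx]

-- the scan-order pair list of A's nested loops
def pvPairs (L C : Nat) : List (Nat × Nat) :=
  (List.range L).flatMap fun i => (List.range C).map fun j => (i, j)

theorem mem_pvPairs {L C : Nat} {q : Nat × Nat} : q ∈ pvPairs L C ↔ q.1 < L ∧ q.2 < C := by
  unfold pvPairs
  constructor
  · intro h
    simp only [List.mem_flatMap, List.mem_map, List.mem_range] at h
    obtain ⟨i, hi, j, hj, rfl⟩ := h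
    exact ⟨hi, hj⟩
  · rintro ⟨h1, h2⟩
    simp only [List.mem_flatMap, List.mem_map, List.mem_range]
    exact ⟨q.1, h1, q.2, h2, rfl⟩

-- the scan order is strictly increasing lexicographically
theorem pvPairs_pairwise (L C : Nat) :
    (pvPairs L C).Pairwise (fun q q' : Nat × Nat => q.1 < q'.1 ∨ (q.1 = q'.1 ∧ q.2 < q'.2)) := by
  induction L with
  | zero => simp [pvPairs]
  | succ L ih =>
    unfold pvPairs
    rw [List.range_succ, List.flatMap_append]
    rw [List.pairwise_append]
    refine ⟨ih, ?_, ?_⟩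
    · simp only [List.flatMap_cons, List.flatMap_nil, List.append_nil]
      rw [List.pairwise_map]
      exact List.pairwise_lt_range.imp (fun h => Or.inr ⟨rfl, h⟩)
    · intro x hx y hy
      have hx' := (mem_pvPairs.mp hx).1
      simp only [List.flatMap_cons, List.flatMap_nil, List.append_nil, List.mem_map,
        List.mem_range] at hy
      obtain ⟨j, _, rfl⟩ := hy
      exact Or.inl hx'

-- on a strictly descending list, find? returns a match that dominates every match
theorem find?_dominates {α : Type} {R : α → α → Prop} {p : α → Bool} :
    ∀ {l : List α} {q x : α}, l.Pairwise (fun a b => R b a) → l.find? p = some q →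
      x ∈ l → p x = true → x = q ∨ R x q := by
  intro l
  induction l with
  | nil => intro q x _ h; simp at h
  | cons a t ih =>
    intro q x hpw hf hx hp
    obtain ⟨ha, ht⟩ := List.pairwise_cons.mp hpw
    by_cases hpa : p a = true
    · rw [List.find?_cons_of_pos hpa] at hf
      cases hf
      rcases List.mem_cons.mp hx with rfl | hxt
      · exact Or.inl rfl
      · exact Or.inr (ha x hxt)
    · rw [List.find?_cons_of_neg hpa] at hf
      rcases List.mem_cons.mp hx with rfl | hxt
      · exact absurd hp hpa
      · exact ih ht hf hxt hp

-- A's nested Int-range fold, flattened over pvPairs and characterised as the reverse first match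
theorem achaA_fold (tab : List (List String)) :
    (PySem.List.pyRange 0 (tab.length : Int) 1).foldl (fun s i =>
        (PySem.List.pyRange 0 (((PySem.List.pyGetD tab 0 []) : List String).length : Int) 1).foldl (fun s j =>
          if PySem.List.pyGetD (PySem.List.pyGetD tab i []) j "" ≠ " " then (i, j) else s) s)
      ((0 : Int), (0 : Int))
      = (((pvPairs tab.length (tab.getD 0 []).length).reverse.find? fun q =>
            ((tab.getD q.1 []).getD q.2 "") ≠ " ").map
            (fun q => ((q.1 : Int), (q.2 : Int)))).getD (0, 0) := by
  rw [PySem.List.pyGetD_zero]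
  rw [PySem.List.pyRange_zero_nat, PySem.List.pyRange_zero_nat, List.foldl_map]
  simp only [List.foldl_map, PySem.List.pyGetD_natCast]
  rw [← foldl_overwrite_eq_find?_reverse
        (P := fun q : Nat × Nat => ((tab.getD q.1 []).getD q.2 "") ≠ " ")
        (g := fun q : Nat × Nat => ((q.1 : Int), (q.2 : Int)))]
  unfold pvPairs
  rw [List.foldl_flatMap]
  simp only [List.foldl_map]

-- B's backward search list is exactly the reverse of A's scan order
theorem pairs_reverse (L C : Nat) :
    (List.range L).reverse.flatMap (fun i => (List.range C).reverse.map fun j => (i, j))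
      = (pvPairs L C).reverse := by
  unfold pvPairs
  rw [List.reverse_flatMap]
  apply List.flatMap_congr
  intro i _
  simp [Function.comp, List.map_reverse]

-- dict lookups coincide with the closed formulas on keys 0..7
theorem traduz_eq (i j : Nat) (hi : i < 8) (hj : j < 8) :
    traduz_posicao (i : Int) (j : Int) = traduz_posicao_alt (i : Int) (j : Int) := by
  interval_cases i <;> interval_cases j <;> decide

-- ===== VERDICT (by name: the statement is the Claim_ definition above) =====
theorem acha_posicao_peca_spec : Claim_equal_acha_posicao_peca := by
  intro tab _ hpre
  obtain ⟨hne, hrows, hmax⟩ := hpre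
  unfold Spec_acha_posicao_peca acha_posicao_peca acha_posicao_peca_alt
  simp only []
  rw [achaA_fold, pairs_reverse]
  cases hf : (pvPairs tab.length (tab.getD 0 []).length).reverse.find?
      (fun q => ((tab.getD q.1 []).getD q.2 "") ≠ " ") with
  | none => decide
  | some q =>
      have hq : q ∈ pvPairs tab.length (tab.getD 0 []).length := by
        have := List.mem_of_find?_eq_some hf
        simpa using this
      obtain ⟨h1, h2⟩ := mem_pvPairs.mp hq
      have hpq : ((tab.getD q.1 []).getD q.2 "") ≠ " " := by
        have := List.find?_some hf
        simpa using this
      have hin : q.1 ≤ 7 ∧ q.2 ≤ 7 := by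
        by_contra hout
        obtain ⟨i', hi', j', hj', hp', hi7, hj7, hlt⟩ :=
          hmax q.1 h1 q.2 h2 hpq (by omega)
        have hmem : ((i', j') : Nat × Nat) ∈
            (pvPairs tab.length (tab.getD 0 []).length).reverse := by
          rw [List.mem_reverse]; exact mem_pvPairs.mpr ⟨hi', hj'⟩
        have hpw : ((pvPairs tab.length (tab.getD 0 []).length).reverse).Pairwise
            (fun a b : Nat × Nat => b.1 < a.1 ∨ (b.1 = a.1 ∧ b.2 < a.2)) := by
          rw [List.pairwise_reverse]
          exact pvPairs_pairwise _ _
        have := find?_dominates (R := fun a b : Nat × Nat => a.1 < b.1 ∨ (a.1 = b.1 ∧ a.2 < b.2))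
          hpw hf hmem (by simpa using hp')
        rcases this with heq | hdom
        · have e1 : i' = q.1 := congrArg Prod.fst heq
          have e2 : j' = q.2 := congrArg Prod.snd heq
          omega
        · omega
      have htr := traduz_eq q.1 q.2 (by omega) (by omega)
      simp only [Option.map_some, Option.getD_some, htr, traduz_posicao_alt]
      simp [PySem.List.pyGetD, PySem.List.pyGet?, PySem.List.pyIdx?]
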